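-- pv_equiv track=rewrite | github.com/NhanHoThanh/dga_botnet_phishing_url_detection_extension | backend/feature_engineering.py | _longest_consecutive_consonants
-- ===== SOURCE A (Python) =====
-- CONSONANTS = set("bcdfghjklmnpqrstvwxyz")
--
-- def _longest_consecutive_consonants(s: str) -> int:
--     max_run = current = 0
--     for ch in s.lower():
--         if ch in CONSONANTS:
--             current += 1
--             max_run = max(max_run, current)
--         else:
--             current = 0
--     return max_run
-- ===== SOURCE B (Python) =====
-- CONSONANTS = set("bcdfghjklmnpqrstvwxyz")
--
-- def _longest_consecutive_consonants(s: str) -> int: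
--     chars = s.lower()
--     n = len(chars)
--     best = 0
--     i = 0
--     while i < n:
--         if chars[i] in CONSONANTS:
--             j = i + 1
--             while j < n and chars[j] in CONSONANTS:
--                 j += 1
--             best = max(best, j - i)
--             i = j
--         else:
--             i += 1
--     return best
-- ===== Notes on version B (the rewrite author's own statement) =====
-- stated objective: alternative
-- what changed: Replaces the per-character running-counter fold with a run-skipping scan that locates each maximal consonant run with an inner scan and takes the max of the run lengths.
import Mathlib
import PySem

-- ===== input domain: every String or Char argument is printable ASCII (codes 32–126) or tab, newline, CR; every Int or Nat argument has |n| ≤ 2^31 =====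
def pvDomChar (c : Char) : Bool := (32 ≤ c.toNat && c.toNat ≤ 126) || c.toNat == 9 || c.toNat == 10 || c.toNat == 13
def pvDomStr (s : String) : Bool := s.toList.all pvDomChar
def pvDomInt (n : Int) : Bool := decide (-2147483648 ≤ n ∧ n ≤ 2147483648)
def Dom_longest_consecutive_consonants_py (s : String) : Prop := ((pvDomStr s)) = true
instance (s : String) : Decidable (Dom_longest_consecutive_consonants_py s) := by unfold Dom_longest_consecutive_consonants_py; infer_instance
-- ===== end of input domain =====

-- B replaces A's running-counter fold by a run-skipping scan (measure each maximal
-- consonant run, take the max of run lengths); alternative decomposition, same cost.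

-- shared constant: CONSONANTS = set("bcdfghjklmnpqrstvwxyz"); 'ch in CONSONANTS'
def isConsonant (c : Char) : Bool := ("bcdfghjklmnpqrstvwxyz".toList).contains c

-- ===== PORT A =====
-- for ch in s.lower(): if consonant: current += 1; max_run = max(max_run, current) else current = 0
def longest_consecutive_consonants_py (s : String) : Int :=
  ((PySem.Str.lower s).toList.foldl
    (fun (st : Int × Int) ch =>
      if isConsonant ch then (max st.1 (st.2 + 1), st.2 + 1) else (st.1, 0))
    (0, 0)).1

-- ===== PORT B =====
-- the outer while loop of Source B: at a consonant, the inner scan (takeWhile) measures the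
-- whole run, the index jumps past it (dropWhile); otherwise step one char
def lccGo : List Char → Int
  | [] => 0
  | c :: rest =>
    if isConsonant c then
      max (lccGo (rest.dropWhile isConsonant))
          (1 + ((rest.takeWhile isConsonant).length : Int))
    else lccGo rest
  termination_by l => l.length
  decreasing_by
  · exact Nat.lt_succ_of_le (List.length_dropWhile_le _ _)
  · exact Nat.lt_succ_self _

def longest_consecutive_consonants_py_alt (s : String) : Int :=
  lccGo (PySem.Str.lower s).toList

-- ===== PRECONDITION & SPEC =====
def Spec_longest_consecutive_consonants_py (s : String) (out : Int) : Prop := out = longest_consecutive_consonants_py_alt s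
instance (s : String) (out : Int) : Decidable (Spec_longest_consecutive_consonants_py s out) := by unfold Spec_longest_consecutive_consonants_py; infer_instance

-- ===== CLAIM (what is proved, stated in full; the proofs are below) =====
def Claim_equal_longest_consecutive_consonants_py : Prop := ∀ (s : String), Dom_longest_consecutive_consonants_py s → Spec_longest_consecutive_consonants_py s (longest_consecutive_consonants_py s)

-- ===== LEMMAS AND PROOFS =====

theorem lccGo_nonneg (l : List Char) : 0 ≤ lccGo l := by
  induction l using lccGo.induct with
  | case1 => simp [lccGo]
  | case2 c rest h ih => simp only [lccGo, h, if_true]; omega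
  | case3 c rest h ih => simpa [lccGo, h] using ih

theorem lccGo_run (l : List Char) :
    lccGo l = max ((l.takeWhile isConsonant).length : Int)
                  (lccGo (l.dropWhile isConsonant)) := by
  cases l with
  | nil => simp [lccGo]
  | cons c rest =>
    by_cases h : isConsonant c = true
    · simp only [lccGo, h, if_true, List.takeWhile_cons, List.dropWhile_cons,
        List.length_cons]
      push_cast
      omega
    · simp [lccGo, List.takeWhile_cons, List.dropWhile_cons, h,
        le_max_iff, lccGo_nonneg]

theorem fold_inv (l : List Char) : ∀ (m c : Int), 0 ≤ c → c ≤ m →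
    (l.foldl
      (fun (st : Int × Int) ch =>
        if isConsonant ch then (max st.1 (st.2 + 1), st.2 + 1) else (st.1, 0))
      (m, c)).1
    = max (max m (c + ((l.takeWhile isConsonant).length : Int)))
          (lccGo (l.dropWhile isConsonant)) := by
  induction l with
  | nil =>
    intro m c hc hm
    simp only [List.foldl_nil, List.takeWhile_nil, List.dropWhile_nil, lccGo,
      List.length_nil, Nat.cast_zero]
    omega
  | cons a l ih =>
    intro m c hc hm
    by_cases h : isConsonant a = true
    · simp only [List.foldl_cons, h, if_true, List.takeWhile_cons, List.dropWhile_cons,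
        List.length_cons]
      rw [ih (max m (c + 1)) (c + 1) (by omega) (by omega)]
      push_cast
      omega
    · simp only [List.foldl_cons, h, if_false, List.takeWhile_cons, List.dropWhile_cons,
        Bool.false_eq_true, List.length_nil]
      rw [ih m 0 le_rfl (by omega),
        show lccGo (a :: l) = lccGo l from by simp [lccGo, h], lccGo_run l]
      push_cast
      omega

-- ===== VERDICT (by name: the statement is the Claim_ definition above) =====
theorem longest_consecutive_consonants_py_spec : Claim_equal_longest_consecutive_consonants_py := by
  intro s _
  unfold Spec_longest_consecutive_consonants_py longest_consecutive_consonants_py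
    longest_consecutive_consonants_py_alt
  rw [fold_inv _ 0 0 le_rfl le_rfl, lccGo_run ((PySem.Str.lower s).toList)]
  have := lccGo_nonneg ((PySem.Str.lower s).toList.dropWhile isConsonant)
  omega
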